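-- pv_equiv track=rewrite | github.com/kuanjhe/Master-thesis-code | GA_trainModel.py | countLabelSavePositions
-- ===== SOURCE A (Python) =====
-- def countLabelSavePositions(numClass,Data):
--     count=[]
--     position=[]
--     for i in range(numClass):
--         count.append(0)
--         position.append([])
--     for i in range(len(Data)):
--         for j in range(numClass):
--             if Data[i][-1]==j+1:
--                 count[j]+=1
--                 position[j].append(i)
--     return count,position
-- ===== SOURCE B (Python) =====
-- def countLabelSavePositions(numClass, Data):
--     groups = {}
--     for i, row in enumerate(Data):
--         lab = row[-1]
--         groups[lab] = groups.get(lab, []) + [i]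
--     position = [groups.get(j + 1, []) for j in range(numClass)]
--     count = [len(p) for p in position]
--     return count, position
-- ===== Notes on version B (the rewrite author's own statement) =====
-- stated objective: faster
-- what changed: One grouping pass over Data builds a dict label -> row indices, then position is assembled by one lookup per class and count is derived as list lengths, replacing A's nested per-row/per-class scan with in-place counter increments.
-- outside the precondition, e.g. on countLabelSavePositions(0, [[]]): A returns ([], []), B raises IndexError
import Mathlib
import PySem

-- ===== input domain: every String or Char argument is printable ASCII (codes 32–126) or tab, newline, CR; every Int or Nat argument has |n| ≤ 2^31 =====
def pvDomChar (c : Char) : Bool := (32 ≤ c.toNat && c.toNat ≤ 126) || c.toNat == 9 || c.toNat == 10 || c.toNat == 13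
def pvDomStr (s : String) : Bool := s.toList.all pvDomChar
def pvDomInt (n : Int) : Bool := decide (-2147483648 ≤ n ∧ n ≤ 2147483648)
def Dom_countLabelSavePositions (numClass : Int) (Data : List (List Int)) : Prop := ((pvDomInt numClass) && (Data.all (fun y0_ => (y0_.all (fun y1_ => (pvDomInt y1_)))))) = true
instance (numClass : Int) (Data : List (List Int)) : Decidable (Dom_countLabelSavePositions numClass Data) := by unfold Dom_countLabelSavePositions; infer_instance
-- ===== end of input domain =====

-- B replaces A's nested per-row/per-class counting scan (O(rows*numClass)) by one grouping pass into a dict plus a per-class assembly pass (objective: faster, measured).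

-- ===== PORT A =====
def countLabelSavePositions (numClass : Int) (Data : List (List Int)) : List Int × List (List Int) :=
  let s0 : List Int × List (List Int) :=
    (PySem.List.pyRange 0 numClass 1).foldl
      (fun s _ => (s.1 ++ [(0 : Int)], s.2 ++ [([] : List Int)])) ([], [])
  (PySem.List.pyRange 0 (Data.length : Int) 1).foldl
    (fun s i =>
      (PySem.List.pyRange 0 numClass 1).foldl
        (fun s j =>
          if PySem.List.pyGetD (PySem.List.pyGetD Data i []) (-1) 0 == j + 1 then
            (PySem.List.pySetD s.1 j (PySem.List.pyGetD s.1 j 0 + 1),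
             PySem.List.pySetD s.2 j (PySem.List.pyGetD s.2 j [] ++ [i]))
          else s) s) s0

-- ===== PORT B =====
def countLabelSavePositions_alt (numClass : Int) (Data : List (List Int)) : List Int × List (List Int) :=
  let groups : PySem.Dict Int (List Int) :=
    (PySem.List.enumerate Data).foldl
      (fun d p => d.modify (PySem.List.pyGetD p.2 (-1) 0) [] (· ++ [p.1])) PySem.Dict.empty
  let position : List (List Int) := (PySem.List.pyRange 0 numClass 1).map (fun j => groups.getD (j + 1) [])
  (position.map (fun p => (p.length : Int)), position)

-- ===== PRECONDITION & SPEC =====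
-- Pre_ excludes Data containing an empty row: Python A raises IndexError on Data[i][-1] whenever
-- numClass ≥ 1, and B's single grouping pass reads row[-1] unconditionally and raises even when
-- numClass ≤ 0 (the cite in claim.json shows one such excluded input on which A still returns).
def Pre_countLabelSavePositions (_numClass : Int) (Data : List (List Int)) : Prop :=
  ∀ row ∈ Data, row ≠ []
instance (numClass : Int) (Data : List (List Int)) : Decidable (Pre_countLabelSavePositions numClass Data) := by unfold Pre_countLabelSavePositions; infer_instance
def pvWitness_countLabelSavePositions : Int × List (List Int) := (3, [[1, 2], [5, 1], [0, 2]])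

def Spec_countLabelSavePositions (numClass : Int) (Data : List (List Int)) (out : List Int × List (List Int)) : Prop := out = countLabelSavePositions_alt numClass Data
instance (numClass : Int) (Data : List (List Int)) (out : List Int × List (List Int)) : Decidable (Spec_countLabelSavePositions numClass Data out) := by unfold Spec_countLabelSavePositions; infer_instance

-- ===== CLAIM (what is proved, stated in full; the proofs are below) =====
def Claim_equal_countLabelSavePositions : Prop := ∀ (numClass : Int) (Data : List (List Int)), Dom_countLabelSavePositions numClass Data → Pre_countLabelSavePositions numClass Data → Spec_countLabelSavePositions numClass Data (countLabelSavePositions numClass Data)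

-- ===== LEMMAS AND PROOFS =====

-- label read by both programs from a row
def pvLab (row : List Int) : Int := PySem.List.pyGetD row (-1) 0

-- setting entry t of a map over range [0,N) is mapping a pointwise-updated function
theorem pv_set_map_pyRange {α : Type} (N : Int) (f : Int → α) (t : Nat) (ht : (t : Int) < N) (v : α) :
    ((PySem.List.pyRange 0 N 1).map f).set t v
      = (PySem.List.pyRange 0 N 1).map (fun k => if k = (t : Int) then v else f k) := by
  apply List.ext_getElem
  · simp
  · intro k h1 h2
    have hk : k < (N - 0).toNat := by simpa [PySem.List.length_pyRange_one] using (by simpa using h2)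
    simp only [List.getElem_set, List.getElem_map, PySem.List.getElem_pyRange_one]
    by_cases hkt : k = t
    · subst hkt; simp
    · have h3 : ¬ ((0 : Int) + k = (t : Int)) := by omega
      have h4 : ¬ t = k := fun h => hkt h.symm
      simp [h4, hkt]

-- reading entry t of a map over range [0,N)
theorem pv_getD_map_pyRange {α : Type} (N : Int) (f : Int → α) (t : Nat) (ht : (t : Int) < N) (d : α) :
    PySem.List.pyGetD ((PySem.List.pyRange 0 N 1).map f) (t : Int) d = f t := by
  have := PySem.List.pyGetD_map_pyRange_of_nonneg (f := f) (n := N) (i := (t : Int)) (d := d)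
    (by exact_mod_cast Int.natCast_nonneg t) ht
  simpa using this

-- A's inner loop over classes, started on map-shaped state, matches the single matching class
theorem pv_innerA (N L i : Int) (c : Int → Int) (p : Int → List Int) (t : Nat) (ht : (t : Int) ≤ N) :
    (PySem.List.pyRange 0 (t : Int) 1).foldl
      (fun s j =>
        if L == j + 1 then
          (PySem.List.pySetD s.1 j (PySem.List.pyGetD s.1 j 0 + 1),
           PySem.List.pySetD s.2 j (PySem.List.pyGetD s.2 j [] ++ [i]))
        else s)
      ((PySem.List.pyRange 0 N 1).map c, (PySem.List.pyRange 0 N 1).map p)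
    = ((PySem.List.pyRange 0 N 1).map (fun k => if L = k + 1 ∧ k < (t : Int) then c k + 1 else c k),
       (PySem.List.pyRange 0 N 1).map (fun k => if L = k + 1 ∧ k < (t : Int) then p k ++ [i] else p k)) := by
  induction t with
  | zero =>
      simp [PySem.List.pyRange_one_eq_nil]
      intro a ha _ _
      exact ha
  | succ t ih =>
      have ht' : (t : Int) ≤ N := by push_cast at ht ⊢; omega
      have hsplit : PySem.List.pyRange 0 ((t : Nat) + 1 : Int) 1
          = PySem.List.pyRange 0 (t : Int) 1 ++ [(t : Int)] := by
        have := PySem.List.pyRange_one_succ_right (a := 0) (b := (t : Int)) (by exact_mod_cast Int.natCast_nonneg t)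
        simpa using this
      have hcast : ((t + 1 : Nat) : Int) = ((t : Nat) + 1 : Int) := by push_cast; ring
      rw [hcast, hsplit, List.foldl_append, ih ht']
      simp only [List.foldl_cons, List.foldl_nil]
      have htN : (t : Int) < N := by push_cast at ht; omega
      by_cases hL : L = (t : Int) + 1
      · have hbeq : (L == (t : Int) + 1) = true := by simp [hL]
        rw [if_pos hbeq]
        rw [pv_getD_map_pyRange N _ t htN, pv_getD_map_pyRange N _ t htN]
        have hnot : ¬ ((t : Int) = (t : Int) + 1 ∧ (t : Int) < (t : Int)) := by omega
        simp only [PySem.List.pySetD_natCast]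
        rw [pv_set_map_pyRange N _ t htN, pv_set_map_pyRange N _ t htN, Prod.mk.injEq]
        constructor <;>
        · apply List.map_congr_left
          intro k hk
          rw [PySem.List.mem_pyRange_one] at hk
          by_cases hkt : k = (t : Int)
          · subst hkt
            rw [if_pos rfl, if_pos (⟨hL, by omega⟩ : L = (t : Int) + 1 ∧ (t : Int) < (t : Int) + 1), if_neg (show ¬ (L = (t : Int) + 1 ∧ (t : Int) < (t : Int)) by omega)]
          · have hno : ¬ L = k + 1 := by omega
            rw [if_neg hkt, if_neg (fun h => hno h.1), if_neg (fun h => hno h.1)]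
      · have hbeq : (L == (t : Int) + 1) = false := by simp [hL]
        rw [if_neg (by simp [hbeq]), Prod.mk.injEq]
        constructor <;>
        · apply List.map_congr_left
          intro k hk
          rw [PySem.List.mem_pyRange_one] at hk
          have heq : (L = k + 1 ∧ k < (t : Int)) ↔ (L = k + 1 ∧ k < (t : Int) + 1) := by omega
          exact if_congr heq rfl rfl

-- the filtered index list of the first t rows
def pvPos (Data : List (List Int)) (t : Nat) (k : Int) : List Int :=
  ((PySem.List.enumerate (Data.take t)).filter (fun q => pvLab q.2 == k + 1)).map (·.1)

theorem pvPos_succ (Data : List (List Int)) (t : Nat) (h : t < Data.length) (k : Int) :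
    pvPos Data (t + 1) k
      = pvPos Data t k ++ (if pvLab Data[t] = k + 1 then [(t : Int)] else []) := by
  unfold pvPos
  rw [List.take_add_one, List.getElem?_eq_getElem h]
  simp only [Option.toList_some, PySem.List.enumerate_append, List.filter_append, List.map_append]
  have hlen : (Data.take t).length = t := by simp [Nat.le_of_lt h]
  rw [hlen]
  by_cases hm : pvLab Data[t] = k + 1
  · simp [PySem.List.enumerate, hm]
  · simp [PySem.List.enumerate, hm]

-- A's outer loop over the first t rows, fully characterised
theorem pv_outerA (numClass : Int) (Data : List (List Int)) (t : Nat) (ht : t ≤ Data.length) :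
    (PySem.List.pyRange 0 (t : Int) 1).foldl
      (fun s i =>
        (PySem.List.pyRange 0 numClass 1).foldl
          (fun s j =>
            if PySem.List.pyGetD (PySem.List.pyGetD Data i []) (-1) 0 == j + 1 then
              (PySem.List.pySetD s.1 j (PySem.List.pyGetD s.1 j 0 + 1),
               PySem.List.pySetD s.2 j (PySem.List.pyGetD s.2 j [] ++ [i]))
            else s) s)
      ((PySem.List.pyRange 0 numClass 1).map (fun _ => (0 : Int)),
       (PySem.List.pyRange 0 numClass 1).map (fun _ => ([] : List Int)))
    = ((PySem.List.pyRange 0 numClass 1).map (fun k => ((pvPos Data t k).length : Int)),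
       (PySem.List.pyRange 0 numClass 1).map (fun k => pvPos Data t k)) := by
  induction t with
  | zero =>
      simp [PySem.List.pyRange_one_eq_nil, pvPos]
  | succ t ih =>
      have ht' : t ≤ Data.length := Nat.le_of_succ_le ht
      have htlt : t < Data.length := ht
      have hsplit : PySem.List.pyRange 0 ((t : Nat) + 1 : Int) 1
          = PySem.List.pyRange 0 (t : Int) 1 ++ [(t : Int)] := by
        have := PySem.List.pyRange_one_succ_right (a := 0) (b := (t : Int)) (by exact_mod_cast Int.natCast_nonneg t)
        simpa using this
      have hcast : ((t + 1 : Nat) : Int) = ((t : Nat) + 1 : Int) := by push_cast; ring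
      rw [hcast, hsplit, List.foldl_append, ih ht']
      simp only [List.foldl_cons, List.foldl_nil]
      have hget : PySem.List.pyGetD Data (t : Int) [] = Data[t] := by
        simp [htlt]
      set L := pvLab Data[t] with hLdef
      have hbody : (fun (s : List Int × List (List Int)) j =>
            if PySem.List.pyGetD (PySem.List.pyGetD Data (t : Int) []) (-1) 0 == j + 1 then
              (PySem.List.pySetD s.1 j (PySem.List.pyGetD s.1 j 0 + 1),
               PySem.List.pySetD s.2 j (PySem.List.pyGetD s.2 j [] ++ [(t : Int)]))
            else s)
          = (fun (s : List Int × List (List Int)) j =>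
            if L == j + 1 then
              (PySem.List.pySetD s.1 j (PySem.List.pyGetD s.1 j 0 + 1),
               PySem.List.pySetD s.2 j (PySem.List.pyGetD s.2 j [] ++ [(t : Int)]))
            else s) := by
        funext s j
        rw [hget]
        rfl
      by_cases hNn : 0 ≤ numClass
      · have hNt : ((numClass.toNat : Nat) : Int) = numClass := Int.toNat_of_nonneg hNn
        have := pv_innerA numClass L (t : Int)
          (fun k => ((pvPos Data t k).length : Int)) (fun k => pvPos Data t k)
          numClass.toNat (le_of_eq hNt)
        rw [hbody]
        rw [hNt] at this
        rw [this, Prod.mk.injEq]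
        constructor <;>
        · apply List.map_congr_left
          intro k hk
          rw [PySem.List.mem_pyRange_one] at hk
          rw [pvPos_succ Data t htlt k]
          by_cases hm : L = k + 1
          · have h2 : L = k + 1 ∧ k < numClass := ⟨hm, hk.2⟩
            have hm' : pvLab Data[t] = k + 1 := hm
            simp [h2, hm']
          · have h2 : ¬ (L = k + 1 ∧ k < numClass) := fun h => hm h.1
            have hm' : ¬ pvLab Data[t] = k + 1 := hm
            simp [h2, hm']
      · have hnil : PySem.List.pyRange 0 numClass 1 = [] :=
          PySem.List.pyRange_one_eq_nil (by omega)
        simp [hnil]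

-- B's dict lookup is the same filtered index list
theorem pv_groupsB (Data : List (List Int)) (k : Int) :
    ((PySem.List.enumerate Data).foldl
        (fun d p => d.modify (PySem.List.pyGetD p.2 (-1) 0) [] (· ++ [p.1])) PySem.Dict.empty).getD
      (k + 1) []
    = pvPos Data Data.length k := by
  have h1 : (PySem.List.enumerate Data).foldl
      (fun d p => d.modify (PySem.List.pyGetD p.2 (-1) 0) [] (· ++ [p.1])) PySem.Dict.empty
      = ((PySem.List.enumerate Data).map (fun p => (pvLab p.2, p.1))).foldl
      (fun d q => d.modify q.1 [] (· ++ [q.2])) PySem.Dict.empty := by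
    rw [List.foldl_map]
    rfl
  rw [h1, PySem.Dict.getD_foldl_modify_append]
  unfold pvPos
  rw [List.take_length, List.filter_map, List.map_map]
  rfl
-- ===== VERDICT (by name: the statement is the Claim_ definition above) =====

theorem countLabelSavePositions_spec : Claim_equal_countLabelSavePositions := by
  intro numClass Data _ _
  simp only [Spec_countLabelSavePositions, countLabelSavePositions, countLabelSavePositions_alt]
  have hinit : (PySem.List.pyRange 0 numClass 1).foldl
      (fun (s : List Int × List (List Int)) _ => (s.1 ++ [(0 : Int)], s.2 ++ [([] : List Int)])) ([], [])
      = ((PySem.List.pyRange 0 numClass 1).map (fun _ => (0 : Int)),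
         (PySem.List.pyRange 0 numClass 1).map (fun _ => ([] : List Int))) := by
    rw [PySem.List.foldl_prod_mk (f := fun acc _ => acc ++ [(0 : Int)])
        (g := fun acc _ => acc ++ [([] : List Int)])]
    rw [PySem.List.foldl_append_singleton_eq_map, PySem.List.foldl_append_singleton_eq_map]
    simp
  rw [hinit, pv_outerA numClass Data Data.length (le_refl _), Prod.mk.injEq]
  constructor
  · rw [List.map_map]
    apply List.map_congr_left
    intro k _
    simp only [Function.comp_apply]
    rw [pv_groupsB Data k]
  · apply List.map_congr_left
    intro k _
    rw [pv_groupsB Data k]
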